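-- pv_equiv track=rewrite | github.com/onojk/budget-tracker | fix_dashboard_routes.py | strip_orphan_analysis_block
-- ===== SOURCE A (Python) =====
-- def strip_orphan_analysis_block(lines):
--     """
--     Remove stray top-level analysis block that starts with base_q/income_total/spending_total.
--     """
--     patterns = (
--         "base_q = Transaction.query.filter",
--         "income_total =",
--         "spending_total =",
--     )
--
--     new_lines = []
--     i = 0
--     n = len(lines)
--
--     while i < n:
--         line = lines[i]
--         stripped = line.strip()
--
--         if any(stripped.startswith(p) for p in patterns):
--             # Skip this line and subsequent non-blank lines (the block)
--             i += 1
--             while i < n and lines[i].strip() != "":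
--                 i += 1
--             # Optionally skip the following blank line too
--             if i < n and lines[i].strip() == "":
--                 i += 1
--             continue
--         else:
--             new_lines.append(line)
--             i += 1
--
--     return new_lines
-- ===== SOURCE B (Python) =====
-- def strip_orphan_analysis_block(lines):
--     """
--     Remove stray top-level analysis block that starts with base_q/income_total/spending_total.
--     """
--     patterns = (
--         "base_q = Transaction.query.filter",
--         "income_total =",
--         "spending_total =",
--     )
--
--     # Pass 1: group the lines into maximal segments of equal blankness.
--     segments = []
--     for line in lines:
--         blank = (line.strip() == "")
--         if segments and segments[-1][0] == blank:
--             segments[-1][1].append(line)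
--         else:
--             segments.append((blank, [line]))
--
--     # Pass 2: truncate each non-blank run at its first matching line and
--     # drop exactly one blank line right after a truncated run.
--     out = []
--     drop_blank = False
--     for blank, chunk in segments:
--         if blank:
--             out.extend(chunk[1:] if drop_blank else chunk)
--             drop_blank = False
--         else:
--             j = next((k for k, l in enumerate(chunk)
--                       if any(l.strip().startswith(p) for p in patterns)), None)
--             if j is None:
--                 out.extend(chunk)
--             else:
--                 out.extend(chunk[:j])
--                 drop_blank = True
--     return out
-- ===== Notes on version B (the rewrite author's own statement) =====
-- stated objective: alternative
-- what changed: Replaces A's index-driven while loop with nested skip loops by a two-pass decomposition: first group lines into maximal blank/non-blank segments, then truncate each non-blank run at its first matching line and drop one following blank.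
import Mathlib
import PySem

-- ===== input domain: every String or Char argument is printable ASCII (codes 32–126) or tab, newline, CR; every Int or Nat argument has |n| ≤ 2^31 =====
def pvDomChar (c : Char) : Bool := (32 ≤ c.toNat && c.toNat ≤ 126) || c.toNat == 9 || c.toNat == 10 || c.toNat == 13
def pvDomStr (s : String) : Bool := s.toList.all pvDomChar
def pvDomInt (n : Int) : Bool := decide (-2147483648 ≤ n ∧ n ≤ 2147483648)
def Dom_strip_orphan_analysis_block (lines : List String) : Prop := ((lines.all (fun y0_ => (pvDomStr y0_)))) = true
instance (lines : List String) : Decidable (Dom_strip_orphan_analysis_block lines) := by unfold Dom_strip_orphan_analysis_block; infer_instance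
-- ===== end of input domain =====

-- B is an alternative decomposition of A (segment the lines, then truncate runs); same return value, no speed claim.

-- shared helpers (the literal patterns tuple and the two tests both Pythons perform on a line)
def pvPatterns : List String :=
  ["base_q = Transaction.query.filter", "income_total =", "spending_total ="]

def pvIsBlank (l : String) : Bool := PySem.Str.strip l == ""

def pvMatches (l : String) : Bool :=
  pvPatterns.any (fun p => PySem.Str.startswith (PySem.Str.strip l) p)

-- ===== PORT A =====
-- A's optional skip of the single blank line after the inner while loop
def pvSkipOneBlank : List String → List String
  | [] => []
  | l :: t => if pvIsBlank l then t else l :: t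

-- literal port of A's while loop: the list suffix from index i plays the role of i
def strip_orphan_analysis_block (lines : List String) : List String :=
  match lines with
  | [] => []
  | line :: rest =>
    if pvMatches line then
      -- inner while: skip subsequent non-blank lines; then optionally one blank
      strip_orphan_analysis_block (pvSkipOneBlank (rest.dropWhile (fun l => ¬ pvIsBlank l)))
    else
      line :: strip_orphan_analysis_block rest
termination_by lines.length
decreasing_by
  · have h1 : (rest.dropWhile (fun l => ¬ pvIsBlank l)).length ≤ rest.length :=
      rest.length_dropWhile_le _
    have h2 : ∀ xs : List String, (pvSkipOneBlank xs).length ≤ xs.length := by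
      intro xs; cases xs with
      | nil => simp [pvSkipOneBlank]
      | cons a t => simp only [pvSkipOneBlank]; split <;> simp
    have := h2 (rest.dropWhile (fun l => ¬ pvIsBlank l))
    simp only [List.length_cons]; omega
  · simp

-- ===== PORT B =====
-- pass 1 step: segments[-1] is the head of the accumulator (kept reversed, reversed at the end)
def pvSegStep (segs : List (Bool × List String)) (line : String) : List (Bool × List String) :=
  let b := pvIsBlank line
  match segs with
  | [] => [(b, [line])]
  | (b0, c) :: t => if b0 == b then (b0, c ++ [line]) :: t else (b, [line]) :: (b0, c) :: t

-- pass 2 step: state (out, drop_blank)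
def pvPassStep (st : List String × Bool) (seg : Bool × List String) : List String × Bool :=
  let (out, d) := st
  let (blank, chunk) := seg
  if blank then
    (out ++ (if d then chunk.drop 1 else chunk), false)
  else
    match chunk.findIdx? pvMatches with
    | none => (out ++ chunk, d)
    | some j => (out ++ chunk.take j, true)

def strip_orphan_analysis_block_alt (lines : List String) : List String :=
  let segments := (lines.foldl pvSegStep []).reverse
  (segments.foldl pvPassStep ([], false)).1

-- ===== PRECONDITION & SPEC =====
def Spec_strip_orphan_analysis_block (lines : List String) (out : List String) : Prop := out = strip_orphan_analysis_block_alt lines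
instance (lines : List String) (out : List String) : Decidable (Spec_strip_orphan_analysis_block lines out) := by unfold Spec_strip_orphan_analysis_block; infer_instance

-- ===== CLAIM (what is proved, stated in full; the proofs are below) =====
def Claim_equal_strip_orphan_analysis_block : Prop := ∀ (lines : List String), Dom_strip_orphan_analysis_block lines → Spec_strip_orphan_analysis_block lines (strip_orphan_analysis_block lines)

-- ===== LEMMAS AND PROOFS =====

-- common one-pass state machine both ports are reduced to (skipping : Bool)
def pvSM : Bool → List String → List String
  | _, [] => []
  | false, l :: t => if pvMatches l then pvSM true t else l :: pvSM false t
  | true, l :: t => if pvIsBlank l then pvSM false t else pvSM true t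

-- recursive form of pass 1: remaining segments given current segment (b, cur)
def pvSeg2 (b : Bool) (cur : List String) : List String → List (Bool × List String)
  | [] => [(b, cur)]
  | l :: t =>
    if pvIsBlank l == b then pvSeg2 b (cur ++ [l]) t
    else (b, cur) :: pvSeg2 (pvIsBlank l) [l] t

-- recursive form of pass 2
def pvProc (d : Bool) : List (Bool × List String) → List String
  | [] => []
  | (true, c) :: t => (if d then c.drop 1 else c) ++ pvProc false t
  | (false, c) :: t =>
    match c.findIdx? pvMatches with
    | none => c ++ pvProc d t
    | some j => c.take j ++ pvProc true t

lemma pvSM_false_cons (l : String) (t : List String) :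
    pvSM false (l :: t) = if pvMatches l then pvSM true t else l :: pvSM false t := rfl

lemma pvSM_true_cons (l : String) (t : List String) :
    pvSM true (l :: t) = if pvIsBlank l then pvSM false t else pvSM true t := rfl

lemma pvSeg2_cons (b : Bool) (cur : List String) (l : String) (t : List String) :
    pvSeg2 b cur (l :: t) =
      if pvIsBlank l == b then pvSeg2 b (cur ++ [l]) t
      else (b, cur) :: pvSeg2 (pvIsBlank l) [l] t := rfl

lemma pvProc_true_cons (d : Bool) (c : List String) (t : List (Bool × List String)) :
    pvProc d ((true, c) :: t) = (if d then c.drop 1 else c) ++ pvProc false t := rfl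

lemma pvProc_false_cons (d : Bool) (c : List String) (t : List (Bool × List String)) :
    pvProc d ((false, c) :: t) =
      match c.findIdx? pvMatches with
      | none => c ++ pvProc d t
      | some j => c.take j ++ pvProc true t := rfl

lemma fi_append_none (p : String → Bool) (xs : List String) (l : String)
    (h : xs.findIdx? p = none) (hl : p l = false) : (xs ++ [l]).findIdx? p = none := by
  rw [List.findIdx?_append]; simp [h, List.findIdx?_cons, hl]

lemma fi_append_match (p : String → Bool) (xs : List String) (l : String)
    (h : xs.findIdx? p = none) (hl : p l = true) : (xs ++ [l]).findIdx? p = some xs.length := by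
  rw [List.findIdx?_append]; simp [h, List.findIdx?_cons, hl]

lemma fi_append_some (p : String → Bool) (xs : List String) (l : String) (j : Nat)
    (h : xs.findIdx? p = some j) : (xs ++ [l]).findIdx? p = some j := by
  rw [List.findIdx?_append]; simp [h]

-- a blank line never matches a pattern
lemma blank_not_matches (l : String) (h : pvIsBlank l = true) : pvMatches l = false := by
  simp only [pvIsBlank, beq_iff_eq] at h
  simp only [pvMatches, pvPatterns, h, List.any_cons, List.any_nil]
  decide

-- ===== A = pvSM false =====
lemma sm_true_skip (t : List String) :
    pvSM true t = pvSM false (pvSkipOneBlank (t.dropWhile (fun l => ¬ pvIsBlank l))) := by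
  induction t with
  | nil => rfl
  | cons l t ih =>
    rw [pvSM_true_cons]
    cases hb : pvIsBlank l with
    | true => simp [hb, pvSkipOneBlank]
    | false => simp [hb, ih]

lemma pvSkip_len (xs : List String) : (pvSkipOneBlank xs).length ≤ xs.length := by
  cases xs with
  | nil => simp [pvSkipOneBlank]
  | cons a t => simp only [pvSkipOneBlank]; split <;> simp

lemma a_eq_sm (lines : List String) : strip_orphan_analysis_block lines = pvSM false lines := by
  induction hn : lines.length using Nat.strong_induction_on generalizing lines with
  | _ n ih =>
    cases lines with
    | nil => rw [strip_orphan_analysis_block]; rfl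
    | cons line rest =>
      rw [strip_orphan_analysis_block, pvSM_false_cons]
      cases hm : pvMatches line with
      | true =>
        rw [if_pos rfl, if_pos rfl, sm_true_skip]
        have h1 : (rest.dropWhile (fun l => ¬ pvIsBlank l)).length ≤ rest.length :=
          rest.length_dropWhile_le _
        have h2 := pvSkip_len (rest.dropWhile (fun l => ¬ pvIsBlank l))
        exact ih _ (by simp only [List.length_cons] at hn; omega) _ rfl
      | false =>
        rw [if_neg (by simp), if_neg (by simp)]
        rw [ih rest.length (by simp only [List.length_cons] at hn; omega) rest rfl]

-- ===== B = pvSM false =====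
lemma foldl_segStep (lines : List String) :
    ∀ (b : Bool) (c : List String) (accT : List (Bool × List String)),
    (lines.foldl pvSegStep ((b, c) :: accT)).reverse = accT.reverse ++ pvSeg2 b c lines := by
  induction lines with
  | nil => intro b c accT; simp [pvSeg2]
  | cons l t ih =>
    intro b c accT
    simp only [List.foldl_cons, pvSegStep, pvSeg2_cons]
    by_cases h : pvIsBlank l = b
    · subst h; simp [ih]
    · have h1 : (b == pvIsBlank l) = false := by
        simp only [beq_eq_false_iff_ne]; exact fun e => h e.symm
      have h2 : (pvIsBlank l == b) = false := by simp [h]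
      simp [h1, h2, ih]

lemma foldl_passStep (segs : List (Bool × List String)) :
    ∀ (out : List String) (d : Bool),
    (segs.foldl pvPassStep (out, d)).1 = out ++ pvProc d segs := by
  induction segs with
  | nil => intro out d; simp [pvProc]
  | cons s t ih =>
    intro out d
    obtain ⟨b, c⟩ := s
    cases b with
    | true =>
      simp only [List.foldl_cons, pvPassStep, pvProc_true_cons, if_true]
      rw [ih]; simp
    | false =>
      simp only [List.foldl_cons, pvPassStep, pvProc_false_cons]
      cases c.findIdx? pvMatches with
      | none => rw [ih]; simp
      | some j => rw [ih]; simp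

-- the three-state invariant relating pvProc ∘ pvSeg2 to pvSM
lemma key (rest : List String) : ∀ (cur : List String), cur ≠ [] →
    ((∀ l ∈ cur, pvIsBlank l = true) →
        ∀ d, pvProc d (pvSeg2 true cur rest) = (if d then cur.drop 1 else cur) ++ pvSM false rest)
  ∧ ((cur.findIdx? pvMatches = none) →
        pvProc false (pvSeg2 false cur rest) = cur ++ pvSM false rest)
  ∧ (∀ j, cur.findIdx? pvMatches = some j →
        ∀ d, pvProc d (pvSeg2 false cur rest) = cur.take j ++ pvSM true rest) := by
  induction rest with
  | nil =>
    intro cur hne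
    refine ⟨?_, ?_, ?_⟩
    · intro _ d; simp [pvSeg2, pvProc, pvSM]
    · intro h; simp [pvSeg2, pvProc, pvSM, h]
    · intro j h d; simp [pvSeg2, pvProc, pvSM, h]
  | cons l t ih =>
    intro cur hne
    have h1 : 1 ≤ cur.length := by
      cases cur with
      | nil => exact absurd rfl hne
      | cons a b => simp
    refine ⟨?_, ?_, ?_⟩
    · -- blank segment
      intro hall d
      rw [pvSeg2_cons, pvSM_false_cons]
      cases hb : pvIsBlank l with
      | true =>
        have hm := blank_not_matches l hb
        rw [if_pos (by simp)]
        rw [(ih (cur ++ [l]) (by simp)).1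
              (by intro x hx
                  rcases List.mem_append.mp hx with h | h
                  · exact hall x h
                  · simp only [List.mem_singleton] at h; subst h; exact hb) d]
        cases d <;> simp [hm, List.drop_append_of_le_length h1]
      | false =>
        rw [if_neg (by simp), pvProc_true_cons]
        cases hm : pvMatches l with
        | true =>
          rw [(ih [l] (by simp)).2.2 0 (by simp [hm]) false]
          simp
        | false =>
          rw [(ih [l] (by simp)).2.1 (by simp [hm])]
          simp
    · -- non-blank segment, no match yet
      intro hnone
      rw [pvSeg2_cons, pvSM_false_cons]
      cases hb : pvIsBlank l with
      | true =>
        have hm := blank_not_matches l hb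
        rw [if_neg (by simp), pvProc_false_cons, hnone]
        rw [(ih [l] (by simp)).1
              (by intro x hx; simp only [List.mem_singleton] at hx; subst hx; exact hb) false]
        simp [hm]
      | false =>
        rw [if_pos (by simp)]
        cases hm : pvMatches l with
        | true =>
          rw [(ih (cur ++ [l]) (by simp)).2.2 cur.length
                (fi_append_match _ _ _ hnone hm) false]
          simp
        | false =>
          rw [(ih (cur ++ [l]) (by simp)).2.1 (fi_append_none _ _ _ hnone hm)]
          simp
    · -- non-blank segment, match at j
      intro j hj d
      have hjlt : j < cur.length := (List.findIdx?_eq_some_iff_findIdx_eq.mp hj).1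
      rw [pvSeg2_cons, pvSM_true_cons]
      cases hb : pvIsBlank l with
      | true =>
        rw [if_neg (by simp), pvProc_false_cons, hj]
        rw [(ih [l] (by simp)).1
              (by intro x hx; simp only [List.mem_singleton] at hx; subst hx; exact hb) true]
        simp
      | false =>
        rw [if_pos (by simp)]
        rw [(ih (cur ++ [l]) (by simp)).2.2 j (fi_append_some _ _ _ _ hj) d]
        rw [List.take_append_of_le_length (by omega)]
        simp

lemma b_eq_sm (lines : List String) : strip_orphan_analysis_block_alt lines = pvSM false lines := by
  cases lines with
  | nil => rfl
  | cons l t =>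
    unfold strip_orphan_analysis_block_alt
    simp only [List.foldl_cons, pvSegStep]
    rw [foldl_segStep t (pvIsBlank l) [l] []]
    simp only [List.reverse_nil, List.nil_append]
    rw [foldl_passStep]
    simp only [List.nil_append]
    rw [pvSM_false_cons]
    cases hb : pvIsBlank l with
    | true =>
      have hm := blank_not_matches l hb
      rw [(key t [l] (by simp)).1
            (by intro x hx; simp only [List.mem_singleton] at hx; subst hx; exact hb) false]
      simp [hm]
    | false =>
      cases hm : pvMatches l with
      | true =>
        rw [(key t [l] (by simp)).2.2 0 (by simp [hm]) false]
        rw [if_pos rfl]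
        simp
      | false =>
        rw [(key t [l] (by simp)).2.1 (by simp [hm])]
        rw [if_neg (by simp)]
        simp

-- ===== VERDICT (by name: the statement is the Claim_ definition above) =====
theorem strip_orphan_analysis_block_spec : Claim_equal_strip_orphan_analysis_block := by
  intro lines _
  unfold Spec_strip_orphan_analysis_block
  rw [a_eq_sm, b_eq_sm]
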